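-- pv_equiv track=rewrite | github.com/fernando-mota-1/interview-prep | sorting/balanced_split.py | balancedSplitExists
-- ===== SOURCE A (Python) =====
-- def balancedSplitExists(arr):
--   # Write your code here
--   s_arr = sorted(arr)
--   for i in range(len(s_arr)-1):
--     a = sum(s_arr[:i+1])
--     b = sum(s_arr[i+1:])
--     if a == b:
--       return True if s_arr[i] != s_arr[i+1] else False
--
--   return False
-- ===== SOURCE B (Python) =====
-- def balancedSplitExists(arr):
--     s = sorted(arr)
--     total = sum(s)
--     run = 0
--     for i in range(len(s) - 1):
--         run += s[i]
--         if 2 * run == total: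
--             return s[i] != s[i + 1]
--     return False
-- ===== Notes on version B (the rewrite author's own statement) =====
-- stated objective: faster
-- what changed: Replaced the per-index recomputation of both slice sums with one pre-computed total and a running prefix sum (2*run == total test), removing the inner O(n) scans.
import Mathlib
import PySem

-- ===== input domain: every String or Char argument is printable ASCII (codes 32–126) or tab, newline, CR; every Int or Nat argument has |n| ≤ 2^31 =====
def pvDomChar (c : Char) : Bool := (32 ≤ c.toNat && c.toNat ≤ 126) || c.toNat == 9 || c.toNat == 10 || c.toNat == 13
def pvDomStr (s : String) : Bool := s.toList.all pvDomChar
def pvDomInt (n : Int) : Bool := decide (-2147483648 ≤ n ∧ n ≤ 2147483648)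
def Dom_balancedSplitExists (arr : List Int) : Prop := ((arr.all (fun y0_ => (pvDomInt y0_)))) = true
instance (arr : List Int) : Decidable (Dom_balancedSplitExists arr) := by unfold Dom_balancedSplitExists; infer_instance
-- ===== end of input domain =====

-- B recomputes A's result with one pre-computed total and a running prefix sum instead of
-- re-summing both slices at every split point; return value only, no mutation.

-- ===== PORT A =====
-- the 'for i in range(len(s_arr)-1)' loop of A: slice sums recomputed at each index
def balancedSplitExistsLoopA (s : List Int) : List Int → Bool
  | [] => false
  | i :: rest =>
      let a := (PySem.List.slice s none (some (i + 1))).sum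
      let b := (PySem.List.slice s (some (i + 1)) none).sum
      if a = b then
        if PySem.List.pyGetD s i 0 ≠ PySem.List.pyGetD s (i + 1) 0 then true else false
      else balancedSplitExistsLoopA s rest

def balancedSplitExists (arr : List Int) : Bool :=
  let sArr := PySem.List.sorted arr id false
  balancedSplitExistsLoopA sArr (PySem.List.pyRange 0 ((sArr.length : Int) - 1) 1)

-- ===== PORT B =====
-- B's loop: running prefix sum 'run' compared against the pre-computed total
def balancedSplitExistsLoopB (s : List Int) (total : Int) : Int → List Int → Bool
  | _, [] => false
  | run, i :: rest =>
      let run' := run + PySem.List.pyGetD s i 0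
      if 2 * run' = total then
        PySem.List.pyGetD s i 0 ≠ PySem.List.pyGetD s (i + 1) 0
      else balancedSplitExistsLoopB s total run' rest

def balancedSplitExists_alt (arr : List Int) : Bool :=
  let s := PySem.List.sorted arr id false
  let total := s.sum
  balancedSplitExistsLoopB s total 0 (PySem.List.pyRange 0 ((s.length : Int) - 1) 1)

-- ===== PRECONDITION & SPEC =====
def Spec_balancedSplitExists (arr : List Int) (out : Bool) : Prop := out = balancedSplitExists_alt arr
instance (arr : List Int) (out : Bool) : Decidable (Spec_balancedSplitExists arr out) := by unfold Spec_balancedSplitExists; infer_instance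

-- ===== CLAIM (what is proved, stated in full; the proofs are below) =====
def Claim_equal_balancedSplitExists : Prop := ∀ (arr : List Int), Dom_balancedSplitExists arr → Spec_balancedSplitExists arr (balancedSplitExists arr)

-- ===== LEMMAS AND PROOFS =====

-- the two loops agree on the tail range starting at a, given run = sum of the first a elements
lemma balancedSplit_loop_eq (d : Nat) : ∀ (s : List Int) (a : Nat) (run : Int),
    s.length - 1 - a = d → run = (s.take a).sum →
    balancedSplitExistsLoopA s (PySem.List.pyRange (a : Int) ((s.length : Int) - 1) 1) =
    balancedSplitExistsLoopB s s.sum run (PySem.List.pyRange (a : Int) ((s.length : Int) - 1) 1) := by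
  induction d with
  | zero =>
      intro s a run hd _
      have hle : (s.length : Int) - 1 ≤ (a : Int) := by omega
      rw [PySem.List.pyRange_one_eq_nil hle]
      rfl
  | succ d ih =>
      intro s a run hd hrun
      have hlt : (a : Int) < (s.length : Int) - 1 := by omega
      have ha1 : a + 1 < s.length := by omega
      have ha : a < s.length := by omega
      rw [PySem.List.pyRange_one_cons hlt]
      show balancedSplitExistsLoopA s _ = balancedSplitExistsLoopB s _ _ _
      unfold balancedSplitExistsLoopA balancedSplitExistsLoopB
      have hslice1 : PySem.List.slice s none (some ((a : Int) + 1)) = s.take (a + 1) := by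
        have : ((a : Int) + 1) = ((a + 1 : Nat) : Int) := by push_cast; ring
        rw [this, PySem.List.slice_to_natCast]
      have hslice2 : PySem.List.slice s (some ((a : Int) + 1)) none = s.drop (a + 1) := by
        have : ((a : Int) + 1) = ((a + 1 : Nat) : Int) := by push_cast; ring
        rw [this, PySem.List.slice_from_natCast]
      have hget : PySem.List.pyGetD s (a : Int) 0 = s[a] :=
        by rw [PySem.List.pyGetD_natCast]; exact List.getD_eq_getElem s 0 ha
      have htake : (s.take (a + 1)).sum = run + s[a] := by
        rw [List.take_add_one, List.sum_append, hrun]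
        simp [List.getElem?_eq_getElem ha]
      have htotal : (s.take (a + 1)).sum + (s.drop (a + 1)).sum = s.sum := by
        conv_rhs => rw [← List.take_append_drop (a + 1) s]
        rw [List.sum_append]
      have hcond : ((s.take (a + 1)).sum = (s.drop (a + 1)).sum) ↔
      (2 * (run + PySem.List.pyGetD s (a : Int) 0) = s.sum) := by
        rw [hget]
        omega
      rw [hslice1, hslice2]
      by_cases hc : (s.take (a + 1)).sum = (s.drop (a + 1)).sum
      · rw [if_pos hc, if_pos (hcond.mp hc)]
        by_cases hne : PySem.List.pyGetD s (a : Int) 0 ≠ PySem.List.pyGetD s ((a : Int) + 1) 0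
        · rw [if_pos hne]; exact (decide_eq_true hne).symm
        · rw [if_neg hne]; exact (decide_eq_false hne).symm
      · rw [if_neg hc, if_neg (fun h => hc (hcond.mpr h))]
        have hcast : (a : Int) + 1 = ((a + 1 : Nat) : Int) := by push_cast; ring
        rw [hcast]
        exact ih s (a + 1) (run + PySem.List.pyGetD s (a : Int) 0)
          (by omega)
          (by rw [hget]; omega)

-- ===== VERDICT (by name: the statement is the Claim_ definition above) =====
theorem balancedSplitExists_spec : Claim_equal_balancedSplitExists := by
  intro arr _
  unfold Spec_balancedSplitExists balancedSplitExists balancedSplitExists_alt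
  have h := balancedSplit_loop_eq ((PySem.List.sorted arr id false).length - 1 - 0)
    (PySem.List.sorted arr id false) 0 0 rfl (by simp)
  simpa using h
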